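-- pv_equiv track=rewrite | github.com/Subika-11/Ideathon | backend/app/routers/rfid.py | _is_valid_uid
-- ===== SOURCE A (Python) =====
-- def _is_valid_uid(raw: str) -> bool:
--     """Check if a string looks like a UID: e.g. E9:33:E2:06"""
--     parts = raw.split(":")
--     if len(parts) < 4:
--         return False
--     return all(
--         len(p) == 2 and all(c in "0123456789ABCDEFabcdef" for c in p)
--         for p in parts[:4]
--     )
-- ===== SOURCE B (Python) =====
-- _HEX = "0123456789ABCDEFabcdef"
--
--
-- def _is_valid_uid(raw: str) -> bool:
--     """Check if a string looks like a UID: e.g. E9:33:E2:06"""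
--     s = raw
--     # peel three leading "hh:" groups off the front, no splitting
--     for _ in range(3):
--         if len(s) < 3 or s[2] != ":" or s[0] not in _HEX or s[1] not in _HEX:
--             return False
--         s = s[3:]
--     # fourth group: exactly two hex chars, then end of string or one more colon
--     if len(s) < 2 or s[0] not in _HEX or s[1] not in _HEX:
--         return False
--     return len(s) == 2 or s[2] == ":"
-- ===== Notes on version B (the rewrite author's own statement) =====
-- stated objective: alternative
-- what changed: B never splits the string: it peels three leading two-hex-digit-plus-colon groups in place by indexed prefix checks and then validates the final two-char hex group directly, instead of A's split-on-colon pass that builds a list of parts and validates the first four.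
import Mathlib
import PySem

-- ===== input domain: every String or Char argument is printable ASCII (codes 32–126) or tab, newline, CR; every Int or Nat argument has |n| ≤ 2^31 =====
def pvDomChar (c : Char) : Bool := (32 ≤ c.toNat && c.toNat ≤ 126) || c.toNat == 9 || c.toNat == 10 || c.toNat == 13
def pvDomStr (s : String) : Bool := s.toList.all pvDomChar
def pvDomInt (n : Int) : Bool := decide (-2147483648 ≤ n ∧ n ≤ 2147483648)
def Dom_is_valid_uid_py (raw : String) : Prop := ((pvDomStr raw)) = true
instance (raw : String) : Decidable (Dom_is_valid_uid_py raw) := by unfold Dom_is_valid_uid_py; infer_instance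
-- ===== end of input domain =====

-- B replaces A's split-on-colon-then-validate-parts algorithm by peeling three two-hex-digit-plus-colon prefixes
-- in place and checking the final two-char group directly (objective: alternative, no split pass).

-- ===== PORT A =====
def pvHexStr : String := "0123456789ABCDEFabcdef"

def is_valid_uid_py (raw : String) : Bool :=
  match PySem.Str.split? raw ":" with
  | none => false  -- unreachable: the separator ":" is nonempty, so split? is always some
  | some parts =>
    if parts.length < 4 then false
    else (parts.take 4).all fun p =>
      (PySem.Str.len p == 2) && p.toList.all (fun c => PySem.Str.isIn (String.ofList [c]) pvHexStr)

-- ===== PORT B =====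
-- s[i] not in _HEX, guarded: none (out of range) counts as not-hex
def pvIdxHex (s : List Char) (i : Int) : Bool :=
  match PySem.List.pyGet? s i with
  | some c => PySem.Chars.isIn [c] pvHexStr.toList
  | none => false

-- the for-loop of Source B: n remaining iterations each peel a two-hex-digit-plus-colon prefix, then the final check
def pvPeel : Nat → List Char → Bool
  | n+1, s =>
    if decide (s.length < 3) || !(PySem.List.pyGet? s 2 == some ':')
        || !pvIdxHex s 0 || !pvIdxHex s 1 then false
    else pvPeel n (PySem.List.slice s (some 3) none)
  | 0, s =>
    if decide (s.length < 2) || !pvIdxHex s 0 || !pvIdxHex s 1 then false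
    else decide (s.length = 2) || (PySem.List.pyGet? s 2 == some ':')

def is_valid_uid_py_alt (raw : String) : Bool := pvPeel 3 raw.toList

-- ===== PRECONDITION & SPEC =====
def Spec_is_valid_uid_py (raw : String) (out : Bool) : Prop := out = is_valid_uid_py_alt raw
instance (raw : String) (out : Bool) : Decidable (Spec_is_valid_uid_py raw out) := by unfold Spec_is_valid_uid_py; infer_instance

-- ===== CLAIM (what is proved, stated in full; the proofs are below) =====
def Claim_equal_is_valid_uid_py : Prop := ∀ (raw : String), Dom_is_valid_uid_py raw → Spec_is_valid_uid_py raw (is_valid_uid_py raw)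

-- ===== LEMMAS AND PROOFS =====

-- c ∈ _HEX, on chars
def hexB (c : Char) : Bool := PySem.Chars.isIn [c] pvHexStr.toList

theorem hexB_colon : hexB ':' = false := by decide

theorem hexB_ne_colon {c : Char} (h : hexB c = true) : c ≠ ':' := by
  intro hc; subst hc; simp [hexB_colon] at h

-- structural model of raw.split(":"): cons-based, no fuel
def splitC : List Char → List (List Char)
  | [] => [[]]
  | c :: rest =>
    if c = ':' then [] :: splitC rest
    else
      match splitC rest with
      | [] => [[c]]
      | p :: ps => (c :: p) :: ps

theorem splitC_ne_nil (l : List Char) : splitC l ≠ [] := by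
  cases l with
  | nil => simp [splitC]
  | cons c rest =>
    by_cases hc : c = ':'
    · simp [splitC, hc]
    · cases h : splitC rest <;> simp [splitC, hc, h]

theorem go_spec : ∀ (fuel : Nat) (l cur : List Char) (acc : List (List Char)),
    l.length ≤ fuel →
    PySem.Chars.splitOn.go [':'] fuel l cur acc
      = acc.reverse ++ (splitC l).modifyHead (fun p => cur.reverse ++ p) := by
  intro fuel
  induction fuel with
  | zero =>
    intro l cur acc h
    have hl : l = [] := List.eq_nil_of_length_eq_zero (Nat.le_zero.mp h)
    subst hl
    rw [PySem.Chars.splitOn.go]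
    simp [splitC]
  | succ n ih =>
    intro l cur acc h
    cases l with
    | nil =>
      rw [PySem.Chars.splitOn.go.eq_def]
      simp [splitC]
    | cons c rest =>
      by_cases hc : c = ':'
      · subst hc
        have hstep : PySem.Chars.splitOn.go [':'] (n+1) (':'::rest) cur acc
            = PySem.Chars.splitOn.go [':'] n rest [] (cur.reverse :: acc) := by
          rw [PySem.Chars.splitOn.go]
          simp [List.isPrefixOf]
        rw [hstep, ih rest [] (cur.reverse :: acc) (by simpa using Nat.lt_succ_iff.mp (by simpa using h))]
        cases hs : splitC rest with
        | nil => exact absurd hs (splitC_ne_nil rest)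
        | cons p ps => simp [splitC, hs]
      · have hp : ([':'].isPrefixOf (c::rest)) = false := by
          simp [List.isPrefixOf]; exact fun hcc => absurd hcc.symm hc
        have hstep : PySem.Chars.splitOn.go [':'] (n+1) (c::rest) cur acc
            = PySem.Chars.splitOn.go [':'] n rest (c::cur) acc := by
          rw [PySem.Chars.splitOn.go]
          simp only [hp, Bool.false_eq_true, if_false]
        rw [hstep, ih rest (c::cur) acc (by simpa using Nat.lt_succ_iff.mp (by simpa using h))]
        cases hs : splitC rest with
        | nil => exact absurd hs (splitC_ne_nil rest)
        | cons p ps => simp [splitC, hc, hs]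

theorem splitOn_eq_splitC (l : List Char) :
    PySem.Chars.splitOn l [':'] = splitC l := by
  unfold PySem.Chars.splitOn
  rw [go_spec (l.length + 1) l [] [] (by omega)]
  cases hs : splitC l with
  | nil => exact absurd hs (splitC_ne_nil l)
  | cons p ps => simp

-- A's check, parametric in the number of required parts
def goodp (p : List Char) : Bool := (p.length == 2) && p.all hexB

def chk (m : Nat) (parts : List (List Char)) : Bool :=
  if parts.length < m then false else (parts.take m).all goodp

theorem chk_zero (ps : List (List Char)) : chk 0 ps = true := by simp [chk]

theorem chk_cons (m : Nat) (p : List Char) (ps : List (List Char)) :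
    chk (m+1) (p::ps) = (goodp p && chk m ps) := by
  by_cases h : ps.length < m
  · simp [chk, h, Nat.succ_lt_succ h]
  · simp [chk, h]

theorem chk_nil (m : Nat) : chk (m+1) [] = false := by simp [chk]

theorem splitC_head (c : Char) (hc : c ≠ ':') (rest : List Char) :
    ∃ q ps, splitC (c::rest) = (c::q)::ps ∧ splitC rest = q::ps := by
  cases h : splitC rest with
  | nil => exact absurd h (splitC_ne_nil rest)
  | cons p ps => exact ⟨p, ps, by simp [splitC, hc, h], rfl⟩

theorem splitC_head2 (c1 c2 : Char) (hc1 : c1 ≠ ':') (hc2 : c2 ≠ ':') (rest : List Char) :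
    ∃ q ps, splitC (c1::c2::rest) = (c1::c2::q)::ps ∧ splitC rest = q::ps := by
  obtain ⟨q, ps, hq2, hr⟩ := splitC_head c2 hc2 rest
  obtain ⟨q', ps', hq1, hr1⟩ := splitC_head c1 hc1 (c2::rest)
  rw [hq2] at hr1
  obtain ⟨hq, hp⟩ := List.cons.inj hr1
  exact ⟨q, ps, by rw [hq1, hq, hp], hr⟩

theorem splitC_head3 (c1 c2 c3 : Char) (hc1 : c1 ≠ ':') (hc2 : c2 ≠ ':') (hc3 : c3 ≠ ':')
    (rest : List Char) :
    ∃ q ps, splitC (c1::c2::c3::rest) = (c1::c2::c3::q)::ps := by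
  obtain ⟨q, ps, hq3, hr⟩ := splitC_head c3 hc3 rest
  obtain ⟨q', ps', hq12, hr12⟩ := splitC_head2 c1 c2 hc1 hc2 (c3::rest)
  rw [hq3] at hr12
  obtain ⟨hq, hp⟩ := List.cons.inj hr12
  exact ⟨q, ps, by rw [hq12, hq, hp]⟩

theorem goodp_long (c1 c2 c3 : Char) (q : List Char) : goodp (c1::c2::c3::q) = false := by
  have : ((q.length + 3 == 2) : Bool) = false := by simp
  simp [goodp]

theorem chk_head_false {m : Nat} {p : List Char} {ps : List (List Char)}
    (h : goodp p = false) : chk (m+1) (p::ps) = false := by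
  rw [chk_cons, h, Bool.false_and]

theorem pvIdxHex_zero (c : Char) (s : List Char) : pvIdxHex (c::s) 0 = hexB c := by
  simp [pvIdxHex, hexB, PySem.List.pyGet?, PySem.List.pyIdx?]

theorem pvIdxHex_one (c1 c2 : Char) (s : List Char) : pvIdxHex (c1::c2::s) 1 = hexB c2 := by
  simp [pvIdxHex, hexB, PySem.List.pyGet?, PySem.List.pyIdx?]

theorem pyGet_two_cons (c1 c2 c3 : Char) (s : List Char) :
    PySem.List.pyGet? (c1::c2::c3::s) 2 = some c3 := by
  simp [PySem.List.pyGet?, PySem.List.pyIdx?, show (2:Int) ≤ (s.length:Int)+1+1 by omega]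

theorem slice_three (c1 c2 c3 : Char) (s : List Char) :
    PySem.List.slice (c1::c2::c3::s) (some 3) none = s := by
  simp [PySem.List.slice]

theorem E : ∀ (k : Nat) (s : List Char), pvPeel k s = chk (k+1) (splitC s) := by
  intro k
  induction k with
  | zero =>
    intro s
    match s with
    | [] => decide
    | [c] =>
      by_cases hc : c = ':' <;> simp [pvPeel, splitC, hc, chk, goodp]
    | c1::c2::rest =>
      by_cases h1 : hexB c1 = true
      case neg =>
        have hf1 : hexB c1 = false := by simpa using h1
        have hA : pvPeel 0 (c1::c2::rest) = false := by
          simp [pvPeel, pvIdxHex_zero, hf1]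
        rw [hA]
        by_cases hc1 : c1 = ':'
        · subst hc1
          rw [show splitC (':'::c2::rest) = [] :: splitC (c2::rest) by simp [splitC]]
          exact (chk_head_false (by simp [goodp])).symm
        · obtain ⟨q, ps, hq, -⟩ := splitC_head c1 hc1 (c2::rest)
          rw [hq]
          exact (chk_head_false (by simp [goodp, hf1])).symm
      case pos =>
      have hc1 : c1 ≠ ':' := hexB_ne_colon h1
      by_cases h2 : hexB c2 = true
      case neg =>
        have hf2 : hexB c2 = false := by simpa using h2
        have hA : pvPeel 0 (c1::c2::rest) = false := by
          simp [pvPeel, pvIdxHex_zero, pvIdxHex_one, hf2]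
        rw [hA]
        by_cases hc2 : c2 = ':'
        · subst hc2
          rw [show splitC (c1::':'::rest) = [c1] :: splitC rest by simp [splitC, hc1]]
          exact (chk_head_false (by simp [goodp])).symm
        · obtain ⟨q, ps, hq, -⟩ := splitC_head2 c1 c2 hc1 hc2 rest
          rw [hq]
          exact (chk_head_false (by simp [goodp, hf2])).symm
      case pos =>
      have hc2 : c2 ≠ ':' := hexB_ne_colon h2
      match rest with
      | [] =>
        rw [show splitC [c1, c2] = [[c1, c2]] by simp [splitC, hc1, hc2]]
        simp [pvPeel, pvIdxHex_zero, pvIdxHex_one, h1, h2, chk, goodp]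
      | c3::rest' =>
        by_cases hc3 : c3 = ':'
        · subst hc3
          rw [show splitC (c1::c2::':'::rest') = [c1, c2] :: splitC rest'
                by simp [splitC, hc1, hc2]]
          rw [chk_cons, chk_zero]
          simp [pvPeel, pvIdxHex_zero, pvIdxHex_one, h1, h2, pyGet_two_cons, goodp]
        · obtain ⟨q, ps, hq⟩ := splitC_head3 c1 c2 c3 hc1 hc2 hc3 rest'
          rw [hq, chk_head_false (goodp_long c1 c2 c3 q)]
          simp [pvPeel, pvIdxHex_zero, pvIdxHex_one, h1, h2, pyGet_two_cons, hc3]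
  | succ n ih =>
    intro s
    match s with
    | [] =>
      rw [show splitC [] = [[]] from rfl, chk_head_false (by simp [goodp])]
      simp [pvPeel]
    | [c] =>
      by_cases hc : c = ':'
      · subst hc
        rw [show splitC [':'] = [[], []] by simp [splitC], chk_head_false (by simp [goodp])]
        simp [pvPeel]
      · rw [show splitC [c] = [[c]] by simp [splitC, hc], chk_head_false (by simp [goodp])]
        simp [pvPeel]
    | c1::c2::rest =>
      by_cases h1 : hexB c1 = true
      case neg =>
        have hf1 : hexB c1 = false := by simpa using h1
        have hA : pvPeel (n+1) (c1::c2::rest) = false := by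
          simp [pvPeel, pvIdxHex_zero, hf1]
        rw [hA]
        by_cases hc1 : c1 = ':'
        · subst hc1
          rw [show splitC (':'::c2::rest) = [] :: splitC (c2::rest) by simp [splitC]]
          exact (chk_head_false (by simp [goodp])).symm
        · obtain ⟨q, ps, hq, -⟩ := splitC_head c1 hc1 (c2::rest)
          rw [hq]
          exact (chk_head_false (by simp [goodp, hf1])).symm
      case pos =>
      have hc1 : c1 ≠ ':' := hexB_ne_colon h1
      by_cases h2 : hexB c2 = true
      case neg =>
        have hf2 : hexB c2 = false := by simpa using h2
        have hA : pvPeel (n+1) (c1::c2::rest) = false := by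
          simp [pvPeel, pvIdxHex_zero, pvIdxHex_one, hf2]
        rw [hA]
        by_cases hc2 : c2 = ':'
        · subst hc2
          rw [show splitC (c1::':'::rest) = [c1] :: splitC rest by simp [splitC, hc1]]
          exact (chk_head_false (by simp [goodp])).symm
        · obtain ⟨q, ps, hq, -⟩ := splitC_head2 c1 c2 hc1 hc2 rest
          rw [hq]
          exact (chk_head_false (by simp [goodp, hf2])).symm
      case pos =>
      have hc2 : c2 ≠ ':' := hexB_ne_colon h2
      match rest with
      | [] =>
        rw [show splitC [c1, c2] = [[c1, c2]] by simp [splitC, hc1, hc2]]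
        rw [chk_cons, chk_nil, Bool.and_false]
        simp [pvPeel]
      | c3::rest' =>
        by_cases hc3 : c3 = ':'
        · subst hc3
          rw [show splitC (c1::c2::':'::rest') = [c1, c2] :: splitC rest'
                by simp [splitC, hc1, hc2]]
          rw [chk_cons, ← ih rest']
          simp [pvPeel, pvIdxHex_zero, pvIdxHex_one, h1, h2, pyGet_two_cons,
                slice_three, goodp]
        · obtain ⟨q, ps, hq⟩ := splitC_head3 c1 c2 c3 hc1 hc2 hc3 rest'
          rw [hq, chk_head_false (goodp_long c1 c2 c3 q)]
          simp [pvPeel, pyGet_two_cons, hc3]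

-- A's port computes chk 4 of the structural split
theorem goodStr_eq (p : String) :
    ((PySem.Str.len p == 2) && p.toList.all (fun c => PySem.Str.isIn (String.ofList [c]) pvHexStr))
      = goodp p.toList := by
  rw [Bool.eq_iff_iff]
  simp [goodp, hexB, PySem.Str.len_eq, PySem.Str.isIn_eq]
  intro _
  norm_cast

theorem A_eq (raw : String) : is_valid_uid_py raw = chk 4 (splitC raw.toList) := by
  unfold is_valid_uid_py
  have hsplit := PySem.Str.split?_map raw ":"
  cases h : PySem.Str.split? raw ":" with
  | none =>
    rw [h] at hsplit
    simp [PySem.Chars.split?] at hsplit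
  | some parts =>
    rw [h] at hsplit
    simp only [PySem.Chars.split?, Option.map_some] at hsplit
    rw [if_neg (by decide)] at hsplit
    have hparts : parts.map String.toList = splitC raw.toList := by
      have h2 : (":" : String).toList = [':'] := rfl
      rw [Option.some.inj hsplit, h2, splitOn_eq_splitC]
    rw [← hparts]
    simp only [chk, List.length_map, ← List.map_take, List.all_map]
    by_cases hlen : parts.length < 4
    · rw [if_pos hlen, if_pos hlen]
    · rw [if_neg hlen, if_neg hlen]
      exact congrArg _ (funext fun p => goodStr_eq p)

-- ===== VERDICT (by name: the statement is the Claim_ definition above) =====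
theorem is_valid_uid_py_spec : Claim_equal_is_valid_uid_py := by
  intro raw _
  unfold Spec_is_valid_uid_py
  rw [A_eq, is_valid_uid_py_alt, E 3 raw.toList]
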